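-- pv_equiv track=rewrite | github.com/OnoPUNPUN/Contest | Codechef/Codechef Starters 211/WolfDown.py | count_safe_birds
-- ===== SOURCE A (Python) =====
-- def count_safe_birds(n, s):
--
--     first_one_seen = False
--
--     safe_birds = 0
--
--     for ch in s:
--         if ch == '1':
--             first_one_seen = True
--
--         elif not first_one_seen:
--             safe_birds += 1
--
--     return safe_birds
-- ===== SOURCE B (Python) =====
-- def count_safe_birds(n, s):
--     i = s.find('1')
--     return len(s) if i == -1 else i
-- ===== Notes on version B (the rewrite author's own statement) =====
-- stated objective: simpler
-- what changed: Replaces the flag-and-accumulator character loop with a closed form: the answer is the position of the first '1' (s.find('1')), or len(s) if there is none.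
import Mathlib
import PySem

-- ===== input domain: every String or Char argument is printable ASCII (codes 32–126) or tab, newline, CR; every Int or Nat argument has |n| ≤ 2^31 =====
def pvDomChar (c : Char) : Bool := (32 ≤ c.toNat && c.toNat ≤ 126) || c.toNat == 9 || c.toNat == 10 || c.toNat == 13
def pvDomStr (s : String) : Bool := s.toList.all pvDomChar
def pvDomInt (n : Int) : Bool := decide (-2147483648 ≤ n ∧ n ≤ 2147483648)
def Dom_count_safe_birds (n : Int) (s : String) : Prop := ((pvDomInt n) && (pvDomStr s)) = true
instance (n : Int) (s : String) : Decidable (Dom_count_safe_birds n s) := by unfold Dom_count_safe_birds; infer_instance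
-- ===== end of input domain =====

-- B replaces A's flag-and-accumulator loop by a closed form from the first-'1' position (objective: simpler).

-- ===== PORT A =====
-- A's loop state: (first_one_seen, safe_birds)
def count_safe_birds (n : Int) (s : String) : Int :=
  (s.toList.foldl (fun (st : Bool × Int) ch =>
      if ch = '1' then (true, st.2)
      else if st.1 = false then (st.1, st.2 + 1)
      else st) (false, 0)).2

-- ===== PORT B =====
def count_safe_birds_alt (n : Int) (s : String) : Int :=
  let i := PySem.Str.find s "1"
  if i = -1 then PySem.Str.len s else i

-- ===== PRECONDITION & SPEC =====
def Spec_count_safe_birds (n : Int) (s : String) (out : Int) : Prop := out = count_safe_birds_alt n s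
instance (n : Int) (s : String) (out : Int) : Decidable (Spec_count_safe_birds n s out) := by unfold Spec_count_safe_birds; infer_instance

-- ===== CLAIM (what is proved, stated in full; the proofs are below) =====
def Claim_equal_count_safe_birds : Prop := ∀ (n : Int) (s : String), Dom_count_safe_birds n s → Spec_count_safe_birds n s (count_safe_birds n s)

-- ===== LEMMAS AND PROOFS =====

-- once the flag is set, A's loop state never changes
theorem pv_foldl_true (cs : List Char) (c : Int) :
    cs.foldl (fun (st : Bool × Int) ch =>
      if ch = '1' then (true, st.2)
      else if st.1 = false then (st.1, st.2 + 1)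
      else st) (true, c) = (true, c) := by
  induction cs with
  | nil => rfl
  | cons h t ih => simp only [List.foldl_cons]; split <;> simpa using ih

-- A's loop, still scanning (flag false), equals count so far plus the first-'1' position
theorem pv_main (cs : List Char) (c : Int) (k : Nat) :
    (cs.foldl (fun (st : Bool × Int) ch =>
      if ch = '1' then (true, st.2)
      else if st.1 = false then (st.1, st.2 + 1)
      else st) (false, c)).2
    = c + (if PySem.Chars.find.go ['1'] cs k = -1 then (cs.length : Int)
           else PySem.Chars.find.go ['1'] cs k - k) := by
  induction cs generalizing c k with
  | nil => simp [PySem.Chars.find.go]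
  | cons h t ih =>
    by_cases hh : h = '1'
    · subst hh
      have hgo : PySem.Chars.find.go ['1'] ('1' :: t) k = (k : Int) := by
        simp [PySem.Chars.find.go, List.isPrefixOf]
      have hk : ((k : Int)) ≠ -1 := by omega
      simp [hgo, hk, pv_foldl_true]
    · have hpre : ['1'].isPrefixOf (h :: t) = false := by
        simp [List.isPrefixOf]
        exact fun e => hh e.symm
      have hgo : PySem.Chars.find.go ['1'] (h :: t) k
          = PySem.Chars.find.go ['1'] t (k + 1) := by
        simp [PySem.Chars.find.go, hpre]
      simp only [List.foldl_cons, if_neg hh, hgo, if_true, eq_self_iff_true]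
      rw [ih (c + 1) (k + 1)]
      split <;> simp [List.length_cons] <;> push_cast <;> ring

-- ===== VERDICT (by name: the statement is the Claim_ definition above) =====
theorem count_safe_birds_spec : Claim_equal_count_safe_birds := by
  intro n s _
  unfold Spec_count_safe_birds count_safe_birds count_safe_birds_alt
  have h := pv_main s.toList 0 0
  simp only [zero_add] at h
  rw [h]
  simp [PySem.Str.find, PySem.Chars.find, PySem.Str.len]
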